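-- pv_equiv track=rewrite | github.com/YadavAashutosh/GestureVox-AR-Voxel-Builder | shape_library/shapes.py | shape_hollow_cube
-- ===== SOURCE A (Python) =====
-- from typing import List, Tuple
--
-- Coord = Tuple[int, int, int]
--
-- def shape_hollow_cube(size=4) -> List[Coord]:
--     pts = []
--     h = size // 2
--     for x in range(-h, h+1):
--         for y in range(0, size):
--             for z in range(-h, h+1):
--                 on_face = (abs(x) == h or abs(z) == h or y == 0 or y == size-1)
--                 if on_face:
--                     pts.append((x, y, z))
--     return pts
-- ===== SOURCE B (Python) =====
-- from typing import List, Tuple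
--
-- Coord = Tuple[int, int, int]
--
-- def shape_hollow_cube(size=4) -> List[Coord]:
--     # Emit only face points directly: full z-rows for boundary x-slabs and for
--     # the top/bottom y rows, and just the two edge z values for interior columns.
--     h = size // 2
--     if size <= 0:
--         return []
--     zs = list(range(-h, h + 1))
--     z_edge = [0] if h == 0 else [-h, h]
--     pts = []
--     for x in range(-h, h + 1):
--         if abs(x) == h:
--             for y in range(size):
--                 pts.extend((x, y, z) for z in zs)
--         else:
--             pts.extend((x, 0, z) for z in zs)
--             for y in range(1, size - 1):
--                 pts.extend((x, y, z) for z in z_edge)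
--             pts.extend((x, size - 1, z) for z in zs)
--     return pts
-- ===== Notes on version B (the rewrite author's own statement) =====
-- stated objective: faster
-- what changed: B emits only face points directly (full z-rows only for boundary x-slabs and top/bottom y rows, two edge z values for interior columns), removing A's full z-scan with a per-point test.
import Mathlib
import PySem

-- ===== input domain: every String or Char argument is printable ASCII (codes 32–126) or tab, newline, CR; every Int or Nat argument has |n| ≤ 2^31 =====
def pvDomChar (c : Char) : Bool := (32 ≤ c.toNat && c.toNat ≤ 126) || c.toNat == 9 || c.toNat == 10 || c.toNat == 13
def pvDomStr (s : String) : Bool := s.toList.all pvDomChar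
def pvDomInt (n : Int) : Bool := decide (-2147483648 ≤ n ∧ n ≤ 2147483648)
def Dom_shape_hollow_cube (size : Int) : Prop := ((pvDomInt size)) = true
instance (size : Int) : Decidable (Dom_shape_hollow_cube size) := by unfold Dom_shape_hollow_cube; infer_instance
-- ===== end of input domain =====

-- B emits only the face points directly (full z-rows for boundary x-slabs and for the top/bottom
-- y rows, just the two edge z values for interior columns) instead of A's full z-scan with a
-- per-point test; a timing run reports B measurably faster (asymptotically smaller work).

-- ===== PORT A =====
def shape_hollow_cube (size : Int) : List (Int × Int × Int) :=
  let h := PySem.Int.floordiv size 2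
  (PySem.List.pyRange (-h) (h + 1) 1).foldl (fun pts x =>
    (PySem.List.pyRange 0 size 1).foldl (fun pts y =>
      (PySem.List.pyRange (-h) (h + 1) 1).foldl (fun pts z =>
        let on_face : Bool := |x| == h || |z| == h || y == 0 || y == size - 1
        if on_face then pts ++ [(x, y, z)] else pts) pts) pts) []

-- ===== PORT B =====
def shape_hollow_cube_alt (size : Int) : List (Int × Int × Int) :=
  let h := PySem.Int.floordiv size 2
  if size ≤ 0 then []
  else
    let zs := PySem.List.pyRange (-h) (h + 1) 1
    let z_edge : List Int := if h == 0 then [0] else [-h, h]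
    (PySem.List.pyRange (-h) (h + 1) 1).foldl (fun pts x =>
      if |x| == h then
        (PySem.List.pyRange 0 size 1).foldl
          (fun pts y => pts ++ zs.map (fun z => (x, y, z))) pts
      else
        let pts1 := pts ++ zs.map (fun z => (x, 0, z))
        let pts2 := (PySem.List.pyRange 1 (size - 1) 1).foldl
          (fun pts y => pts ++ z_edge.map (fun z => (x, y, z))) pts1
        pts2 ++ zs.map (fun z => (x, size - 1, z))) []

-- ===== PRECONDITION & SPEC =====
def Spec_shape_hollow_cube (size : Int) (out : List (Int × Int × Int)) : Prop := out = shape_hollow_cube_alt size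
instance (size : Int) (out : List (Int × Int × Int)) : Decidable (Spec_shape_hollow_cube size out) := by unfold Spec_shape_hollow_cube; infer_instance

-- ===== CLAIM (what is proved, stated in full; the proofs are below) =====
def Claim_equal_shape_hollow_cube : Prop := ∀ (size : Int), Dom_shape_hollow_cube size → Spec_shape_hollow_cube size (shape_hollow_cube size)

-- ===== LEMMAS AND PROOFS =====

-- a fold whose step appends a row per element is a flatMap
theorem pvFoldlExtend {α β : Type} (l : List α) (f : List β → α → List β)
    (row : α → List β) (hstep : ∀ acc x, f acc x = acc ++ row x) :
    ∀ init, l.foldl f init = init ++ l.flatMap row := by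
  induction l with
  | nil => intro init; simp
  | cons a t ih =>
    intro init
    simp only [List.foldl_cons, List.flatMap_cons, hstep, ih, List.append_assoc]

theorem pvFlatMapCongr {α β : Type} {l : List α} {f g : α → List β}
    (h : ∀ a ∈ l, f a = g a) : l.flatMap f = l.flatMap g := by
  induction l with
  | nil => rfl
  | cons a t ih =>
    simp only [List.flatMap_cons, h a (List.mem_cons_self ..),
      ih (fun b hb => h b (List.mem_cons_of_mem a hb))]

-- a range with exactly one element
theorem pvRangeSingleton (a b : Int) (h1 : a < b) (h2 : b ≤ a + 1) :
    PySem.List.pyRange a b 1 = [a] := by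
  rw [PySem.List.pyRange_one_cons h1, PySem.List.pyRange_one_eq_nil (by omega)]

-- when x is a boundary slab the on-face test keeps the whole z row
theorem pvFilterFullX (x y size h : Int) (hx : |x| = h) :
    (PySem.List.pyRange (-h) (h + 1) 1).filter
      (fun z => |x| == h || |z| == h || y == 0 || y == size - 1) =
      PySem.List.pyRange (-h) (h + 1) 1 := by
  apply List.filter_eq_self.mpr
  intro z _
  simp [hx]

-- when y is the bottom or top row the on-face test keeps the whole z row
theorem pvFilterFullY (x y size h : Int) (hy : y = 0 ∨ y = size - 1) :
    (PySem.List.pyRange (-h) (h + 1) 1).filter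
      (fun z => |x| == h || |z| == h || y == 0 || y == size - 1) =
      PySem.List.pyRange (-h) (h + 1) 1 := by
  apply List.filter_eq_self.mpr
  intro z _
  rcases hy with hy | hy <;> simp [hy]

-- for an interior column the on-face test keeps exactly the two edge z values
theorem pvFilterEdge (x y size h : Int) (hh : 1 ≤ h)
    (hx : ¬ |x| = h) (hy0 : ¬ y = 0) (hy1 : ¬ y = size - 1) :
    (PySem.List.pyRange (-h) (h + 1) 1).filter
      (fun z => |x| == h || |z| == h || y == 0 || y == size - 1) = [-h, h] := by
  have e1 := PySem.List.pyRange_one_append (-h) (-h + 1) (h + 1) (by omega) (by omega)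
  have e2 := PySem.List.pyRange_one_append (-h + 1) h (h + 1) (by omega) (by omega)
  rw [e1, e2, List.filter_append, List.filter_append,
    pvRangeSingleton (-h) (-h + 1) (by omega) (by omega),
    pvRangeSingleton h (h + 1) (by omega) (by omega)]
  have hmid : (PySem.List.pyRange (-h + 1) h 1).filter
      (fun z => |x| == h || |z| == h || y == 0 || y == size - 1) = [] := by
    rw [List.filter_eq_nil_iff]
    intro z hz
    rw [PySem.List.mem_pyRange_one] at hz
    simp only [Bool.or_eq_true, beq_iff_eq, not_or]
    refine ⟨⟨⟨hx, ?_⟩, hy0⟩, hy1⟩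
    rw [abs_eq (by omega : (0:Int) ≤ h)]
    omega
  have habs1 : |(-h)| = h := by rw [abs_eq (by omega : (0:Int) ≤ h)]; omega
  have habs2 : |h| = h := by rw [abs_eq (by omega : (0:Int) ≤ h)]; omega
  rw [hmid]
  simp [habs1, habs2]

-- A written as a nested flatMap with the on-face filter
theorem pvAFlat (size : Int) :
    shape_hollow_cube size =
      (PySem.List.pyRange (-(PySem.Int.floordiv size 2)) (PySem.Int.floordiv size 2 + 1) 1).flatMap (fun x =>
        (PySem.List.pyRange 0 size 1).flatMap (fun y =>
          ((PySem.List.pyRange (-(PySem.Int.floordiv size 2)) (PySem.Int.floordiv size 2 + 1) 1).filter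
            (fun z => |x| == PySem.Int.floordiv size 2 || |z| == PySem.Int.floordiv size 2 || y == 0 || y == size - 1)).map
            (fun z => (x, y, z)))) := by
  unfold shape_hollow_cube
  refine (pvFoldlExtend _ _ _ ?_ []).trans (List.nil_append _)
  intro acc x
  dsimp only
  refine (pvFoldlExtend _ _ _ ?_ acc)
  intro acc2 y
  exact PySem.List.foldl_append_if _ _ _ _

-- B written as a flatMap emitting each x-column's face points directly
theorem pvBFlat (size : Int) (hs : ¬ size ≤ 0) :
    shape_hollow_cube_alt size =
      (PySem.List.pyRange (-(PySem.Int.floordiv size 2)) (PySem.Int.floordiv size 2 + 1) 1).flatMap (fun x =>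
        if |x| = PySem.Int.floordiv size 2 then
          (PySem.List.pyRange 0 size 1).flatMap (fun y =>
            (PySem.List.pyRange (-(PySem.Int.floordiv size 2)) (PySem.Int.floordiv size 2 + 1) 1).map (fun z => (x, y, z)))
        else
          (PySem.List.pyRange (-(PySem.Int.floordiv size 2)) (PySem.Int.floordiv size 2 + 1) 1).map (fun z => (x, 0, z)) ++
          ((PySem.List.pyRange 1 (size - 1) 1).flatMap (fun y =>
            (if PySem.Int.floordiv size 2 == 0 then [(0 : Int)] else [-(PySem.Int.floordiv size 2), PySem.Int.floordiv size 2]).map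
              (fun z => (x, y, z))) ++
           (PySem.List.pyRange (-(PySem.Int.floordiv size 2)) (PySem.Int.floordiv size 2 + 1) 1).map (fun z => (x, size - 1, z)))) := by
  unfold shape_hollow_cube_alt
  rw [if_neg hs]
  refine (pvFoldlExtend _ _ _ ?_ []).trans (List.nil_append _)
  intro acc x
  dsimp only
  by_cases hc : |x| = PySem.Int.floordiv size 2
  · rw [if_pos (by simpa using hc), if_pos hc]
    exact pvFoldlExtend _ _ _ (fun a y => rfl) acc
  · rw [if_neg (by simpa using hc), if_neg hc]
    have e := pvFoldlExtend (PySem.List.pyRange 1 (size - 1) 1) _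
      (fun y => (if PySem.Int.floordiv size 2 == 0 then [(0 : Int)] else [-(PySem.Int.floordiv size 2), PySem.Int.floordiv size 2]).map
        (fun z => (x, y, z))) (fun a y => rfl)
    rw [e, List.append_assoc, List.append_assoc]

-- ===== VERDICT (by name: the statement is the Claim_ definition above) =====
theorem shape_hollow_cube_spec : Claim_equal_shape_hollow_cube := by
  intro size _
  unfold Spec_shape_hollow_cube
  by_cases hs : size ≤ 0
  · -- empty: A's y range is empty, B returns [] at once
    rw [pvAFlat, PySem.List.pyRange_one_eq_nil (hs : size ≤ 0)]
    unfold shape_hollow_cube_alt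
    rw [if_pos hs]
    simp
  · rw [pvAFlat, pvBFlat size hs]
    have hdiv : PySem.Int.floordiv size 2 = size / 2 :=
      PySem.Int.floordiv_eq_ediv_of_pos (by omega)
    apply pvFlatMapCongr
    intro x hx
    rw [PySem.List.mem_pyRange_one] at hx
    by_cases hxh : |x| = PySem.Int.floordiv size 2
    · rw [if_pos hxh]
      apply pvFlatMapCongr
      intro y _
      rw [pvFilterFullX x y size _ hxh]
    · rw [if_neg hxh]
      -- interior x: h ≥ 1 and size ≥ 2
      have hx0 : (0:Int) ≤ PySem.Int.floordiv size 2 := by rw [hdiv]; omega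
      rw [abs_eq hx0, not_or] at hxh
      have hh1 : (1:Int) ≤ PySem.Int.floordiv size 2 := by omega
      have hsz2 : (2:Int) ≤ size := by have h2 := hh1; rw [hdiv] at h2; omega
      have hedge : (if PySem.Int.floordiv size 2 == 0 then [(0 : Int)]
          else [-(PySem.Int.floordiv size 2), PySem.Int.floordiv size 2]) =
          [-(PySem.Int.floordiv size 2), PySem.Int.floordiv size 2] := by
        rw [if_neg (by simp; omega)]
      rw [hedge]
      have e1 := PySem.List.pyRange_one_append 0 1 size (by omega) (by omega)
      have e2 := PySem.List.pyRange_one_append 1 (size - 1) size (by omega) (by omega)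
      rw [e1, e2, List.flatMap_append, List.flatMap_append,
        pvRangeSingleton 0 1 (by omega) (by omega),
        pvRangeSingleton (size - 1) size (by omega) (by omega)]
      simp only [List.flatMap_cons, List.flatMap_nil, List.append_nil]
      rw [pvFilterFullY x 0 size _ (Or.inl rfl), pvFilterFullY x (size - 1) size _ (Or.inr rfl)]
      congr 1
      congr 1
      apply pvFlatMapCongr
      intro y hy
      rw [PySem.List.mem_pyRange_one] at hy
      rw [pvFilterEdge x y size _ hh1 (by rw [abs_eq hx0, not_or]; exact hxh)
        (by omega) (by omega)]
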